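-- pv_equiv track=rewrite | github.com/ValeriaBelyaeva/algorithms-and-data-structures | lab6/generate.py | generate_lorem_ipsum
-- ===== SOURCE A (Python) =====
-- def generate_lorem_ipsum(word_count):
--     """
--     Возвращает строку из word_count слов (условный 'lorem ipsum').
--     """
--     base_words = (
--         "lorem ipsum dolor sit amet consectetur adipiscing elit sed do eiusmod tempor "
--         "incididunt ut labore et dolore magna aliqua ullamco laboris nisi ut aliquip ex ea "
--         "commodo consequat duis aute irure dolor in reprehenderit in voluptate velit esse "
--         "cillum dolore eu fugiat nulla pariatur excepteur sint occaecat cupidatat non proident "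
--         "sunt in culpa qui officia deserunt mollit anim id est laborum"
--     ).split()
--     # Если нужно больше слов, будем дублировать
--     repeated = []
--     while len(repeated) < word_count:
--         repeated.extend(base_words)
--     return " ".join(repeated[:word_count])
-- ===== SOURCE B (Python) =====
-- def generate_lorem_ipsum(word_count):
--     """
--     Возвращает строку из word_count слов (условный 'lorem ipsum').
--     """
--     base_words = (
--         "lorem ipsum dolor sit amet consectetur adipiscing elit sed do eiusmod tempor "
--         "incididunt ut labore et dolore magna aliqua ullamco laboris nisi ut aliquip ex ea "
--         "commodo consequat duis aute irure dolor in reprehenderit in voluptate velit esse "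
--         "cillum dolore eu fugiat nulla pariatur excepteur sint occaecat cupidatat non proident "
--         "sunt in culpa qui officia deserunt mollit anim id est laborum"
--     ).split()
--     reps = word_count // len(base_words) + 1
--     return " ".join((base_words * reps)[:word_count])
-- ===== Notes on version B (the rewrite author's own statement) =====
-- stated objective: simpler
-- what changed: Replaces the while loop that repeatedly extends a list until it is long enough by a closed-form repetition count (word_count // len(base_words) + 1) and a single list multiplication, then the same slice-and-join.
import Mathlib
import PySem

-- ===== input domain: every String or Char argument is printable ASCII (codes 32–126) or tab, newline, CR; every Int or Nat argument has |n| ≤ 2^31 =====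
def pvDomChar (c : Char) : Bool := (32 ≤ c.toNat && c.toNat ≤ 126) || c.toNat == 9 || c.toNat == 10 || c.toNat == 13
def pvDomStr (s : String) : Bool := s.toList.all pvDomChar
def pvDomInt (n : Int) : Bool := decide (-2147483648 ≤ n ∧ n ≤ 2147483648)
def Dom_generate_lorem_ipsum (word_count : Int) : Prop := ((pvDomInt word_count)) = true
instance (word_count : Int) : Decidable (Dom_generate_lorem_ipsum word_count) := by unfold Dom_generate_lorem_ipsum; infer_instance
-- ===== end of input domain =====

-- B replaces A's repeated-extend while loop by a closed-form repetition count
-- (word_count // len(base_words) + 1) and a single list multiplication (objective: simpler).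

-- ===== PORT A =====
-- the shared base_words constant (the identical string literal appears in both Pythons)
def pvBase : List String := PySem.Str.split₀
  ("lorem ipsum dolor sit amet consectetur adipiscing elit sed do eiusmod tempor " ++
   "incididunt ut labore et dolore magna aliqua ullamco laboris nisi ut aliquip ex ea " ++
   "commodo consequat duis aute irure dolor in reprehenderit in voluptate velit esse " ++
   "cillum dolore eu fugiat nulla pariatur excepteur sint occaecat cupidatat non proident " ++
   "sunt in culpa qui officia deserunt mollit anim id est laborum")

set_option maxRecDepth 8192 in
theorem pvBase_len : pvBase.length = 61 := by rfl

-- while len(repeated) < word_count: repeated.extend(base_words)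
def pvLoopA (word_count : Int) (repeated : List String) : List String :=
  if (repeated.length : Int) < word_count then
    pvLoopA word_count (repeated ++ pvBase)
  else repeated
termination_by (word_count - repeated.length).toNat
decreasing_by
  have h := pvBase_len
  simp only [List.length_append, h]
  omega

def generate_lorem_ipsum (word_count : Int) : String :=
  PySem.Str.join " " (PySem.List.slice (pvLoopA word_count []) none (some word_count))

-- ===== PORT B =====
def generate_lorem_ipsum_alt (word_count : Int) : String :=
  PySem.Str.join " "
    (PySem.List.slice
      (PySem.List.pyRepeat pvBase (PySem.Int.floordiv word_count (pvBase.length : Int) + 1))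
      none (some word_count))

-- ===== PRECONDITION & SPEC =====
def Spec_generate_lorem_ipsum (word_count : Int) (out : String) : Prop := out = generate_lorem_ipsum_alt word_count
instance (word_count : Int) (out : String) : Decidable (Spec_generate_lorem_ipsum word_count out) := by unfold Spec_generate_lorem_ipsum; infer_instance

-- ===== CLAIM (what is proved, stated in full; the proofs are below) =====
def Claim_equal_generate_lorem_ipsum : Prop := ∀ (word_count : Int), Dom_generate_lorem_ipsum word_count → Spec_generate_lorem_ipsum word_count (generate_lorem_ipsum word_count)

-- ===== LEMMAS AND PROOFS =====

-- j concatenated copies of the base list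
def pvRep (j : Nat) : List String := (List.replicate j pvBase).flatten

theorem pvRep_length (j : Nat) : (pvRep j).length = 61 * j := by
  simp [pvRep, List.length_flatten, List.map_replicate, pvBase_len, List.sum_replicate,
        Nat.mul_comm]

theorem pvRep_add (j k : Nat) : pvRep (j + k) = pvRep j ++ pvRep k := by
  unfold pvRep
  rw [List.replicate_add, List.flatten_append]

-- A's loop, started on j copies of the base, ends on some j' copies covering word_count
theorem pvLoopA_rep (wc : Int) : ∀ n j : Nat, (wc - 61 * j).toNat = n →
    ∃ j', pvLoopA wc (pvRep j) = pvRep j' ∧ wc ≤ 61 * j' := by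
  intro n
  induction n using Nat.strong_induction_on with
  | _ n ih =>
    intro j hn
    rw [pvLoopA]
    by_cases h : ((pvRep j).length : Int) < wc
    · rw [if_pos h]
      have hlen : (pvRep j).length = 61 * j := pvRep_length j
      have hstep : pvRep j ++ pvBase = pvRep (j + 1) := by
        rw [pvRep_add]; simp [pvRep]
      rw [hstep]
      refine ih ((wc - 61 * (j + 1)).toNat) ?_ (j + 1) rfl
      rw [hlen] at h
      omega
    · rw [if_neg h]
      exact ⟨j, rfl, by rw [pvRep_length j] at h; push_cast at h; omega⟩

-- a common prefix of any two sufficiently long repetitions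
theorem pvRep_take_mono (m j k : Nat) (h : m ≤ 61 * j) :
    (pvRep (j + k)).take m = (pvRep j).take m := by
  rw [pvRep_add, List.take_append_of_le_length (by rw [pvRep_length]; exact h)]

theorem pvRep_take_eq (m j1 j2 : Nat) (h1 : m ≤ 61 * j1) (h2 : m ≤ 61 * j2) :
    (pvRep j1).take m = (pvRep j2).take m := by
  rcases Nat.le_total j1 j2 with h | h
  · rw [← Nat.add_sub_cancel' h, pvRep_take_mono m j1 (j2 - j1) h1]
  · rw [← Nat.add_sub_cancel' h, pvRep_take_mono m j2 (j1 - j2) h2]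

-- ===== VERDICT (by name: the statement is the Claim_ definition above) =====
theorem generate_lorem_ipsum_spec : Claim_equal_generate_lorem_ipsum := by
  intro wc _
  unfold Spec_generate_lorem_ipsum generate_lorem_ipsum generate_lorem_ipsum_alt
  simp only [pvBase_len, Nat.cast_ofNat]
  have hd : PySem.Int.floordiv wc 61 * 61 + PySem.Int.mod wc 61 = wc :=
    PySem.Int.floordiv_mul_add_mod wc 61
  have hm : PySem.Int.mod wc 61 < 61 := PySem.Int.mod_lt wc (by norm_num)
  have hm0 : 0 ≤ PySem.Int.mod wc 61 := PySem.Int.mod_nonneg wc (by norm_num)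
  by_cases hpos : 0 ≤ wc
  · -- both slices are take wc.toNat of a long-enough repetition of the base
    obtain ⟨jA, hA, hAcov⟩ := pvLoopA_rep wc ((wc - 61 * 0).toNat) 0 rfl
    rw [show ([] : List String) = pvRep 0 from rfl, hA]
    have hbr : PySem.List.pyRepeat pvBase (PySem.Int.floordiv wc 61 + 1)
        = pvRep (PySem.Int.floordiv wc 61 + 1).toNat := rfl
    have hq : 0 ≤ PySem.Int.floordiv wc 61 := by
      by_contra hneg
      push Not at hneg
      omega
    have ht : ((PySem.Int.floordiv wc 61 + 1).toNat : Int) = PySem.Int.floordiv wc 61 + 1 :=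
      Int.toNat_of_nonneg (by omega)
    rw [hbr, PySem.List.slice_to _ hpos, PySem.List.slice_to _ hpos,
        pvRep_take_eq wc.toNat jA (PySem.Int.floordiv wc 61 + 1).toNat (by omega) (by omega)]
  · -- word_count < 0: A's loop never runs and B's repetition count is ≤ 0; both lists empty
    push Not at hpos
    rw [pvLoopA, if_neg (by simp; omega)]
    have hq : PySem.Int.floordiv wc 61 < 0 := by
      by_contra hge
      push Not at hge
      omega
    have hrt : (PySem.Int.floordiv wc 61 + 1).toNat = 0 := by omega
    show _ = PySem.Str.join " "
      (PySem.List.slice (PySem.List.pyRepeat pvBase (PySem.Int.floordiv wc 61 + 1)) none (some wc))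
    rw [show PySem.List.pyRepeat pvBase (PySem.Int.floordiv wc 61 + 1)
        = (List.replicate (PySem.Int.floordiv wc 61 + 1).toNat pvBase).flatten from rfl, hrt]
    rfl
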